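-- pv_equiv track=rewrite | github.com/GenryEden/kpolyakovName | 450.py | f
-- ===== SOURCE A (Python) =====
-- def f(x):
-- 	if x < 2:
-- 		return 0
-- 	elif x == 2:
-- 		return 1
-- 	elif x == 22:
-- 		return 0
-- 	else:
-- 		ans = f(x-1)
-- 		if x % 2 == 0:
-- 			if not(x//2 < 15 < x):
-- 				ans += f(x//2)
-- 		return ans
-- ===== SOURCE B (Python) =====
-- def f(x):
--     if x < 2:
--         return 0
--     t = [0] * (x + 1)
--     t[2] = 1
--     for i in range(3, x + 1):
--         if i == 22:
--             t[i] = 0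
--         else:
--             t[i] = t[i - 1]
--             if i % 2 == 0 and not (i // 2 < 15 < i):
--                 t[i] += t[i // 2]
--     return t[x]
-- ===== Notes on version B (the rewrite author's own statement) =====
-- stated objective: faster
-- what changed: Replaces the overlapping naive recursion f(x-1)/f(x//2) by a bottom-up DP table filled once from 3 to x.
-- outside the precondition, e.g. on f(1005): A does not finish within the time limit, B returns 256584588; on f(1050): A does not finish within the time limit, B returns 348835045
import Mathlib
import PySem

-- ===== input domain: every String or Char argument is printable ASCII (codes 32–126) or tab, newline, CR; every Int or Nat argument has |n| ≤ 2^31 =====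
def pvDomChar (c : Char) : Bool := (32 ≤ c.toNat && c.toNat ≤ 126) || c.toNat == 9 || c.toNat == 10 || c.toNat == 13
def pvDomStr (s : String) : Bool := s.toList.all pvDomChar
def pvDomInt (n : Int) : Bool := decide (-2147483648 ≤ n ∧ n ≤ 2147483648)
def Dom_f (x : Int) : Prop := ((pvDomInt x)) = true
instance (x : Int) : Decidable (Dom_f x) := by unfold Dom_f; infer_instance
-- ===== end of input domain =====

-- B replaces A's overlapping naive recursion by a bottom-up DP table filled once (objective: faster).

-- ===== PORT A =====
def f (x : Int) : Int :=
  if x < 2 then 0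
  else if x = 2 then 1
  else if x = 22 then 0
  else
    let ans := f (x - 1)
    if PySem.Int.mod x 2 = 0 then
      if ¬(PySem.Int.floordiv x 2 < 15 ∧ 15 < x) then ans + f (PySem.Int.floordiv x 2)
      else ans
    else ans
termination_by x.toNat
decreasing_by
  · omega
  · rw [PySem.Int.floordiv_eq_ediv_of_pos (by omega)]; omega

-- ===== PORT B =====
-- the DP table t of Source B after iteration i of the loop (index j holds B's value for input j)
def buildTab : Nat → List Int
  | 0 => [0]
  | 1 => [0, 0]
  | 2 => [0, 0, 1]
  | (n+3) =>
    let t := buildTab (n+2)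
    let i := n+3
    let v : Int :=
      if i = 22 then 0
      else
        let v0 := t.getD (i-1) 0
        if i % 2 = 0 ∧ ¬(i / 2 < 15 ∧ 15 < i) then v0 + t.getD (i / 2) 0 else v0
    t ++ [v]

def f_alt (x : Int) : Int :=
  if x < 2 then 0
  else (buildTab x.toNat).getD x.toNat 0

-- ===== PRECONDITION & SPEC =====
-- Pre_ excludes x >= 1000: A's recursion descends one frame per unit of x (f(x) calls f(x-1) ...),
-- so for such x its depth reaches CPython's default recursion limit of 1000 and A raises
-- RecursionError (the exact cutoff sits a few frames above 1000 and depends on interpreter state;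
-- the handful of inputs between 1000 and that cutoff return only after astronomically many
-- uncached recursive calls and are excluded with the raising ones).
def Pre_f (x : Int) : Prop := x < 1000
instance (x : Int) : Decidable (Pre_f x) := by unfold Pre_f; infer_instance
def pvWitness_f : Int := (10)

def Spec_f (x : Int) (out : Int) : Prop := out = f_alt x
instance (x : Int) (out : Int) : Decidable (Spec_f x out) := by unfold Spec_f; infer_instance

-- ===== CLAIM (what is proved, stated in full; the proofs are below) =====
def Claim_equal_f : Prop := ∀ (x : Int), Dom_f x → Pre_f x → Spec_f x (f x)

-- ===== LEMMAS AND PROOFS =====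
theorem buildTab_length (n : Nat) : (buildTab n).length = n + 1 := by
  induction n using buildTab.induct <;> simp_all [buildTab]

theorem buildTab_get (n j : Nat) (h : j ≤ n) :
    (buildTab n).getD j 0 = f (j : Int) := by
  induction n using buildTab.induct generalizing j with
  | case1 =>
    interval_cases j
    simp [buildTab, f]
  | case2 =>
    interval_cases j <;> simp [buildTab, f]
  | case3 =>
    interval_cases j <;> simp [buildTab, f]
  | case4 n ih =>
    rcases Nat.lt_or_ge j (n + 3) with hj | hj
    · -- j indexes the prefix, which is buildTab (n+2)
      rw [show buildTab (n+3) = buildTab (n+2) ++ [_] from rfl,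
          List.getD_append _ _ _ _ (by rw [buildTab_length]; omega)]
      exact ih j (by omega)
    · -- j = n+3 : the freshly appended element equals f (n+3)
      have hj3 : j = n + 3 := by omega
      subst hj3
      rw [show buildTab (n+3) = buildTab (n+2) ++ [_] from rfl]
      rw [List.getD_eq_getElem?_getD, List.getElem?_append_right (by rw [buildTab_length])]
      rw [buildTab_length]
      simp only [Nat.sub_self, List.getElem?_cons_zero, Option.getD_some]
      -- unfold one step of f at ↑(n+3)
      rw [f]
      have h2 : ¬ ((n + 3 : Nat) : Int) < 2 := by push_cast; omega
      have hmod : PySem.Int.mod ((n + 3 : Nat) : Int) 2 = (((n+3) % 2 : Nat) : Int) :=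
        PySem.Int.mod_natCast _ _
      have hdiv : PySem.Int.floordiv ((n + 3 : Nat) : Int) 2 = (((n+3) / 2 : Nat) : Int) :=
        PySem.Int.floordiv_natCast _ _
      have hd1 : ((n + 3 : Nat) : Int) - 1 = ((n + 2 : Nat) : Int) := by push_cast; omega
      by_cases h22 : n + 3 = 22
      · have : ((n + 3 : Nat) : Int) = 22 := by exact_mod_cast congrArg (Nat.cast (R := Int)) h22
        simp [h22]
      · have h22' : ((n + 3 : Nat) : Int) ≠ 22 := by
          intro hc; exact h22 (by exact_mod_cast hc)
        have hne2 : ((n + 3 : Nat) : Int) ≠ 2 := by push_cast; omega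
        simp only [h2, if_false, hne2, h22', hd1]
        rw [if_neg h22, hmod, hdiv, show n + 3 - 1 = n + 2 from rfl,
            ih (n+2) (by omega)]
        have hmodiff : (((n+3) % 2 : Nat) : Int) = 0 ↔ (n+3) % 2 = 0 := by
          constructor <;> intro hh <;> exact_mod_cast hh
        have hltiff : (((n+3) / 2 : Nat) : Int) < 15 ↔ (n+3) / 2 < 15 := by
          constructor <;> intro hh <;> exact_mod_cast hh
        have hgtiff : (15 : Int) < ((n + 3 : Nat) : Int) ↔ 15 < n + 3 := by
          constructor <;> intro hh <;> exact_mod_cast hh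
        by_cases hm : (n+3) % 2 = 0
        · by_cases hc : (n+3) / 2 < 15 ∧ 15 < n + 3
          · rw [if_neg (by rw [hmodiff, hltiff, hgtiff] at *; tauto),
                if_pos (hmodiff.mpr hm)]
            rw [if_neg (by rw [hltiff, hgtiff]; tauto)]
          · rw [if_pos ⟨hm, hc⟩, if_pos (hmodiff.mpr hm),
                if_pos (by rw [hltiff, hgtiff]; tauto),
                ih ((n+3)/2) (by omega)]
        · rw [if_neg (by tauto), if_neg (by rw [hmodiff]; exact hm)]

theorem f_alt_eq (x : Int) : f_alt x = f x := by
  unfold f_alt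
  by_cases h : x < 2
  · rw [if_pos h, f, if_pos h]
  · rw [if_neg h, buildTab_get x.toNat x.toNat le_rfl,
        Int.toNat_of_nonneg (by omega)]

-- ===== VERDICT (by name: the statement is the Claim_ definition above) =====
theorem f_spec : Claim_equal_f := by
  intro x _ _
  unfold Spec_f
  exact (f_alt_eq x).symm
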